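-- pv_equiv track=rewrite | github.com/marcelofabiangutierrez88/PythonEnClase | manejoCadenas5.4.py | palMayLen
-- ===== SOURCE A (Python) =====
-- def esLetra(x):
--     return (x>='a' and x<='z') or (x>='A' and x<='Z')
--
-- def palMayor (pa, pb):
--     res = pb
--     if len(pa) > len(pb):
--         res = pa
--     return res
--
-- def palMayLen(texto):
--     pal=""
--     palMay=""
--     i=0
--     lenTexto = len(texto)
--
--     if lenTexto!=0:
--         while i<lenTexto:
--             pal=""
--             while(i<lenTexto and not (esLetra(texto[i]))):
--                 i+=1
--             while (i<lenTexto and esLetra(texto[i])):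
--                 pal = pal+texto[i]
--                 i+=1
--             if pal!="":
--                 if palMay!="":
--                     palMay=palMayor(palMay,pal)
--                 else:
--                     palMay = pal
--     return palMay
-- ===== SOURCE B (Python) =====
-- def palMayLen(texto):
--     words = ''.join(c if ('a' <= c <= 'z' or 'A' <= c <= 'Z') else ' ' for c in texto).split()
--     best = ''
--     for w in words:
--         if len(w) >= len(best):
--             best = w
--     return best
-- ===== Notes on version B (the rewrite author's own statement) =====
-- stated objective: idiomatic
-- what changed: Replaced the index-based nested while loops (skip non-letters, accumulate each word char by char with pal = pal + texto[i], compare per word) by mapping non-letters to spaces, splitting the text into words with str.split(), and one linear scan keeping the last longest word.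
import Mathlib
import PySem

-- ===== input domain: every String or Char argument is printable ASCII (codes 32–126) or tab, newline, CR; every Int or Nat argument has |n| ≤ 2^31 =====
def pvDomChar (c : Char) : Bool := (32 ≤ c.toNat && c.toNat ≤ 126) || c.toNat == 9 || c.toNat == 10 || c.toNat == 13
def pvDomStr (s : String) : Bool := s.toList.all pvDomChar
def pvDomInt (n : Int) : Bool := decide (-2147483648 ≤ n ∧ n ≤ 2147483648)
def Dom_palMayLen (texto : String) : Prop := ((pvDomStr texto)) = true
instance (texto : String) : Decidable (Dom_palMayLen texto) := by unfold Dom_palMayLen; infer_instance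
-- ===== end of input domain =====

-- B replaces A's index-based nested while loops by map-non-letters-to-spaces + split() + one
-- linear scan keeping the last longest word (objective: idiomatic).

-- ===== PORT A =====
-- strings are handled as List Char (Lean's own String ops are opaque to the kernel);
-- pal = pal + texto[i] is pal ++ [c]
def esLetra (x : Char) : Bool := ('a' ≤ x && x ≤ 'z') || ('A' ≤ x && x ≤ 'Z')

def palMayor (pa pb : List Char) : List Char :=
  let res := pb
  if pb.length < pa.length then pa else res

-- inner while 1: skip non-letters
def pvSkip : List Char → List Char
  | [] => []
  | c :: r => if !(esLetra c) then pvSkip r else c :: r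

-- inner while 2: collect letters into pal
def pvTake (pal : List Char) : List Char → List Char × List Char
  | [] => (pal, [])
  | c :: r => if esLetra c then pvTake (pal ++ [c]) r else (pal, c :: r)

-- the next three lemmas are cited by pvOuter's termination proof
theorem pvSkip_length_le (l : List Char) : (pvSkip l).length ≤ l.length := by
  induction l with
  | nil => simp [pvSkip]
  | cons c r ih => simp only [pvSkip]; split <;> simp <;> omega

theorem pvSkip_head_letter : ∀ (l : List Char) (c : Char) (r : List Char),
    pvSkip l = c :: r → esLetra c = true := by
  intro l
  induction l with
  | nil => intro c r h; simp [pvSkip] at h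
  | cons a t ih =>
    intro c r h
    simp only [pvSkip] at h
    by_cases ha : esLetra a = true
    · simp [ha] at h; rw [← h.1]; exact ha
    · simp [Bool.not_eq_true] at ha; simp [ha] at h; exact ih c r h

theorem pvTake_snd_length_le (pal : List Char) (l : List Char) :
    (pvTake pal l).2.length ≤ l.length := by
  induction l generalizing pal with
  | nil => simp [pvTake]
  | cons c r ih =>
    simp only [pvTake]; split
    · exact le_trans (ih _) (by simp)
    · simp

-- outer while, over the remaining characters
def pvOuter (cs : List Char) (palMay : List Char) : List Char :=
  match h : cs with
  | [] => palMay
  | _ :: _ =>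
    match h1 : pvSkip cs with
    | [] => palMay
    | c :: r =>
      let t := pvTake [] (c :: r)
      let pal := t.1
      let palMay' := if pal ≠ [] then (if palMay ≠ [] then palMayor palMay pal else pal) else palMay
      pvOuter t.2 palMay'
termination_by cs.length
decreasing_by
  have h2 : (pvSkip cs).length ≤ cs.length := pvSkip_length_le cs
  rw [h1] at h2
  have hc : esLetra c = true := pvSkip_head_letter cs c r h1
  have h3 : (pvTake ([] ++ [c]) r).2.length ≤ r.length := pvTake_snd_length_le _ r
  simp only [pvTake, hc, if_pos] at *
  simp at h2
  rw [h] at h2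
  omega

def palMayLen (texto : String) : String :=
  let cs := texto.toList
  if cs.length ≠ 0 then String.mk (pvOuter cs []) else String.mk []

-- ===== PORT B =====
-- ''.join(c if letter else ' ' for c in texto).split(), then keep the last longest word
def pvToSpace (c : Char) : Char := if ('a' ≤ c && c ≤ 'z') || ('A' ≤ c && c ≤ 'Z') then c else ' '

def palMayLen_alt (texto : String) : String :=
  let words := PySem.Chars.split₀ (texto.toList.map pvToSpace)
  String.mk (words.foldl (fun best w => if best.length ≤ w.length then w else best) [])

-- ===== PRECONDITION & SPEC =====
def Spec_palMayLen (texto : String) (out : String) : Prop := out = palMayLen_alt texto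
instance (texto : String) (out : String) : Decidable (Spec_palMayLen texto out) := by unfold Spec_palMayLen; infer_instance

-- ===== CLAIM (what is proved, stated in full; the proofs are below) =====
def Claim_equal_palMayLen : Prop := ∀ (texto : String), Dom_palMayLen texto → Spec_palMayLen texto (palMayLen texto)

-- ===== LEMMAS AND PROOFS =====

theorem toSpace_of_letter (c : Char) (h : esLetra c = true) : pvToSpace c = c := by
  simp only [esLetra] at h; exact if_pos h

theorem toSpace_of_not (c : Char) (h : ¬ esLetra c = true) : pvToSpace c = ' ' := by
  simp only [esLetra] at h; exact if_neg h

theorem letter_not_space (c : Char) (h : esLetra c = true) : PySem.Chars.isspace c = false := by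
  simp only [esLetra, Bool.or_eq_true, Bool.and_eq_true, decide_eq_true_eq, Char.le_def,
    UInt32.le_iff_toNat_le, show 'a'.val.toNat = 97 from rfl, show 'z'.val.toNat = 122 from rfl,
    show 'A'.val.toNat = 65 from rfl, show 'Z'.val.toNat = 90 from rfl] at h
  simp only [PySem.Chars.isspace]
  simp only [Bool.or_eq_false_iff, Bool.and_eq_false_iff, decide_eq_false_iff_not, Char.toNat]
  omega

theorem isspace_space : PySem.Chars.isspace ' ' = true := by decide

-- split₀.go flushes its accumulator in front of the rest
theorem go_acc : ∀ (l cur : List Char) (acc : List (List Char)),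
    PySem.Chars.split₀.go l cur acc = acc.reverse ++ PySem.Chars.split₀.go l cur [] := by
  intro l
  induction l with
  | nil =>
    intro cur acc
    simp only [PySem.Chars.split₀.go]
    by_cases h : cur.isEmpty <;> simp [h]
  | cons c r ih =>
    intro cur acc
    simp only [PySem.Chars.split₀.go]
    by_cases hs : PySem.Chars.isspace c = true
    · by_cases h : cur.isEmpty = true
      · simp only [hs, if_true, h]
        rw [ih [] acc]
      · simp only [hs, if_true, h]
        rw [ih [] (cur.reverse :: acc), ih [] [cur.reverse]]
        simp
    · simp only [Bool.not_eq_true] at hs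
      simp only [hs, Bool.false_eq_true, if_false]
      exact ih _ _

-- a non-letter head becomes a space and is dropped by split₀.go with empty current word
theorem go_skip (c : Char) (r : List Char) (acc : List (List Char)) (h : ¬ esLetra c = true) :
    PySem.Chars.split₀.go ((c :: r).map pvToSpace) [] acc =
      PySem.Chars.split₀.go (r.map pvToSpace) [] acc := by
  simp only [List.map_cons, toSpace_of_not c h, PySem.Chars.split₀.go, isspace_space, if_true,
    List.isEmpty_nil]

-- while split₀.go is inside a word it accumulates exactly what pvTake collects
theorem take_go : ∀ (l pal : List Char) (acc : List (List Char)), pal ≠ [] →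
    PySem.Chars.split₀.go (l.map pvToSpace) pal.reverse acc =
      PySem.Chars.split₀.go ((pvTake pal l).2.map pvToSpace) [] ((pvTake pal l).1 :: acc) := by
  intro l
  induction l with
  | nil =>
    intro pal acc hp
    simp [pvTake, PySem.Chars.split₀.go, List.isEmpty_iff, hp]
  | cons c r ih =>
    intro pal acc hp
    by_cases hc : esLetra c = true
    · simp only [List.map_cons, toSpace_of_letter c hc, PySem.Chars.split₀.go,
        letter_not_space c hc, Bool.false_eq_true, if_false]
      have : c :: pal.reverse = (pal ++ [c]).reverse := by simp
      rw [this, ih (pal ++ [c]) acc (by simp)]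
      simp only [pvTake, hc, if_true]
    · simp only [pvTake, hc, Bool.false_eq_true, if_false]
      rw [go_skip c r _ hc]
      simp only [List.map_cons, toSpace_of_not c hc, PySem.Chars.split₀.go, isspace_space, if_true]
      simp [List.isEmpty_iff, hp]

theorem pvTake_fst_prefix : ∀ (l pal : List Char), ∃ t, (pvTake pal l).1 = pal ++ t := by
  intro l
  induction l with
  | nil => intro pal; exact ⟨[], by simp [pvTake]⟩
  | cons c r ih =>
    intro pal
    by_cases hc : esLetra c = true
    · obtain ⟨t, ht⟩ := ih (pal ++ [c])
      exact ⟨c :: t, by simp [pvTake, hc, ht]⟩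
    · exact ⟨[], by simp [pvTake, hc]⟩

-- an unfolding of pvOuter without the dependent match equations
theorem pvOuter_eq (cs palMay : List Char) (hcs : cs ≠ []) :
    pvOuter cs palMay =
      match pvSkip cs with
      | [] => palMay
      | c :: r =>
        pvOuter (pvTake [] (c :: r)).2
          (if (pvTake [] (c :: r)).1 ≠ [] then
            (if palMay ≠ [] then palMayor palMay (pvTake [] (c :: r)).1 else (pvTake [] (c :: r)).1)
          else palMay) := by
  match cs with
  | [] => exact absurd rfl hcs
  | a :: b =>
    rw [pvOuter]
    split
    · next heq => rw [heq]
    · next c1 r1 heq => rw [heq]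

-- A's per-word update equals B's "last longest wins" step
theorem step_eq (palMay pal : List Char) :
    (if pal ≠ [] then (if palMay ≠ [] then palMayor palMay pal else pal) else palMay) =
      (if palMay.length ≤ pal.length then pal else palMay) := by
  by_cases hp : pal = []
  · subst hp
    simp only [ne_eq, not_true_eq_false, if_false]
    by_cases hm : palMay = []
    · simp [hm]
    · have h1 : palMay.length ≠ 0 := by simpa [List.length_eq_zero_iff] using hm
      rw [if_neg (by simp; omega)]
  · by_cases hm : palMay = []
    · simp [hm, hp]
    · have h1 : pal.length ≠ 0 := by simpa [List.length_eq_zero_iff] using hp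
      have h2 : palMay.length ≠ 0 := by simpa [List.length_eq_zero_iff] using hm
      simp only [hp, hm, ne_eq, not_false_iff, if_true, palMayor]
      split_ifs <;> first | rfl | omega

theorem main_lemma : ∀ (n : Nat) (cs palMay : List Char), cs.length ≤ n →
    pvOuter cs palMay =
      (PySem.Chars.split₀ (cs.map pvToSpace)).foldl
        (fun best w => if best.length ≤ w.length then w else best) palMay := by
  intro n
  induction n with
  | zero =>
    intro cs palMay hlen
    have : cs = [] := by cases cs <;> simp_all
    subst this
    simp [pvOuter, PySem.Chars.split₀, PySem.Chars.split₀.go]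
  | succ m ih =>
    intro cs palMay hlen
    match cs with
    | [] => simp [pvOuter, PySem.Chars.split₀, PySem.Chars.split₀.go]
    | c :: r =>
      by_cases hc : esLetra c = true
      · -- skip stops immediately; take a word
        have hskip : pvSkip (c :: r) = c :: r := by simp [pvSkip, hc]
        rw [pvOuter_eq _ _ (by simp), hskip]
        have htake : pvTake [] (c :: r) = pvTake [c] r := by simp [pvTake, hc]
        have hne : (pvTake [] (c :: r)).1 ≠ [] := by
          rw [htake]
          obtain ⟨t, ht⟩ := pvTake_fst_prefix r [c]
          simp [ht]
        have hsplit : PySem.Chars.split₀ ((c :: r).map pvToSpace) =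
            (pvTake [] (c :: r)).1 :: PySem.Chars.split₀ ((pvTake [] (c :: r)).2.map pvToSpace) := by
          unfold PySem.Chars.split₀
          simp only [List.map_cons, toSpace_of_letter c hc, PySem.Chars.split₀.go,
            letter_not_space c hc, Bool.false_eq_true, if_false]
          rw [show ((c : Char) :: []) = ([c] : List Char).reverse from by simp,
            take_go r [c] [] (by simp), htake]
          rw [go_acc]
          simp
        rw [hsplit, List.foldl_cons]
        simp only [step_eq]
        have hlen2 : (pvTake [] (c :: r)).2.length ≤ m := by
          have := pvTake_snd_length_le [c] r
          rw [htake]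
          simp at hlen
          omega
        exact ih _ _ hlen2
      · -- head is not a letter: both sides drop it
        have hc' : esLetra c = false := by simpa using hc
        have houter : pvOuter (c :: r) palMay = pvOuter r palMay := by
          match r with
          | [] =>
            rw [pvOuter_eq _ _ (by simp)]
            simp [pvSkip, hc', pvOuter]
          | x :: t =>
            have hs : pvSkip (c :: x :: t) = pvSkip (x :: t) := by simp [pvSkip, hc']
            rw [pvOuter_eq _ _ (by simp), pvOuter_eq _ _ (by simp), hs]
        rw [houter]
        have : PySem.Chars.split₀ ((c :: r).map pvToSpace) =
            PySem.Chars.split₀ (r.map pvToSpace) := by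
          unfold PySem.Chars.split₀
          exact go_skip c r [] hc
        rw [this]
        exact ih r palMay (by simp at hlen; omega)

-- ===== VERDICT (by name: the statement is the Claim_ definition above) =====
theorem palMayLen_spec : Claim_equal_palMayLen := by
  intro texto _
  unfold Spec_palMayLen palMayLen palMayLen_alt
  by_cases h : texto.toList.length = 0
  · simp only [h]
    simp at h
    simp [h, PySem.Chars.split₀, PySem.Chars.split₀.go]
  · rw [if_pos h, main_lemma texto.toList.length texto.toList [] le_rfl]
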